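-- pv_equiv track=rewrite | github.com/mp3exe86-dev/JensHQ | james/james_orchestrator.py | zaehle_vorhanden
-- ===== SOURCE A (Python) =====
-- def zaehle_vorhanden(md_inhalt: str, set_name: str) -> int:
--     count = 0
--     in_set = False
--     set_header = {"basis": "Basis-Set", "fossil": "Fossil", "dschungel": "Dschungel"}
--     header = set_header.get(set_name, "")
--     for zeile in md_inhalt.splitlines():
--         if header in zeile and "##" in zeile:
--             in_set = True
--         elif in_set and zeile.startswith("## ") and header not in zeile:
--             in_set = False
--         if in_set and zeile.strip().startswith("- [x]"):
--             count += 1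
--     return count
-- ===== SOURCE B (Python) =====
-- def zaehle_vorhanden(md_inhalt: str, set_name: str) -> int:
--     header = {"basis": "Basis-Set", "fossil": "Fossil", "dschungel": "Dschungel"}.get(set_name, "")
--
--     def is_on(z):
--         return header in z and "##" in z
--
--     def is_off(z):
--         return z.startswith("## ") and header not in z
--
--     # Split the document into header-delimited blocks; a marker line starts a
--     # new block carrying the flag of its own marker (activating or not).
--     blocks = []
--     cur_on, cur = False, []
--     for z in md_inhalt.splitlines():
--         if is_on(z) or is_off(z):
--             blocks.append((cur_on, cur))
--             cur_on, cur = is_on(z), [z]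
--         else:
--             cur = cur + [z]
--     blocks.append((cur_on, cur))
--     return sum(1 for on, blk in blocks if on for z in blk if z.strip().startswith("- [x]"))
-- ===== Notes on version B (the rewrite author's own statement) =====
-- stated objective: alternative
-- what changed: A's single stateful scan (an in_set flag toggled while counting) is replaced by splitting the document into marker-delimited blocks, each tagged active/inactive by its own marker line, and summing the '- [x]' counts of the active blocks.
import Mathlib
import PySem

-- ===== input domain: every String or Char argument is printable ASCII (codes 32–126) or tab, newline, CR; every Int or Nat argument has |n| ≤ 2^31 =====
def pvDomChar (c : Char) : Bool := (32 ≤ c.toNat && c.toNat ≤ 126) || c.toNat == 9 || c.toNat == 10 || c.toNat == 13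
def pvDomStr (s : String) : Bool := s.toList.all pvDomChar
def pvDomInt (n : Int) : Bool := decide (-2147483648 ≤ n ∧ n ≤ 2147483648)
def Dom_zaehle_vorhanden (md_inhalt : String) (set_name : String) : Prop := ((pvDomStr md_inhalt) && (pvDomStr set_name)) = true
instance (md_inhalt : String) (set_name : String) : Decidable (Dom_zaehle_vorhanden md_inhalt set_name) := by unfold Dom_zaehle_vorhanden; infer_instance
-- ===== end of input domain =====

-- B replaces A's single stateful scan by splitting the document into
-- marker-delimited blocks and summing checked-item counts over the active
-- blocks (different decomposition, same cost).

-- ===== PORT A =====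
-- header = set_header.get(set_name, "")  (shared by both Pythons verbatim)
def pvHeader (set_name : String) : String :=
  (PySem.Dict.ofList [("basis", "Basis-Set"), ("fossil", "Fossil"), ("dschungel", "Dschungel")]).getD set_name ""

-- one iteration of A's for-loop over (count, in_set)
def pvStepA (header : String) (st : Int × Bool) (z : String) : Int × Bool :=
  let in_set :=
    if PySem.Str.isIn header z && PySem.Str.isIn "##" z then true
    else if st.2 && PySem.Str.startswith z "## " && !PySem.Str.isIn header z then false
    else st.2
  (if in_set && PySem.Str.startswith (PySem.Str.strip z) "- [x]" then st.1 + 1 else st.1, in_set)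

def zaehle_vorhanden (md_inhalt : String) (set_name : String) : Int :=
  ((PySem.Str.splitlines md_inhalt).foldl (pvStepA (pvHeader set_name)) (0, false)).1

-- ===== PORT B =====
def pvIsOn (header : String) (z : String) : Bool :=
  PySem.Str.isIn header z && PySem.Str.isIn "##" z

def pvIsOff (header : String) (z : String) : Bool :=
  PySem.Str.startswith z "## " && !PySem.Str.isIn header z

def pvChecked (z : String) : Bool :=
  PySem.Str.startswith (PySem.Str.strip z) "- [x]"

-- one iteration of B's block-building loop over (blocks, cur_on, cur)
def pvStepB (header : String) (st : List (Bool × List String) × Bool × List String)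
    (z : String) : List (Bool × List String) × Bool × List String :=
  if pvIsOn header z || pvIsOff header z then
    (st.1 ++ [(st.2.1, st.2.2)], pvIsOn header z, [z])
  else
    (st.1, st.2.1, st.2.2 ++ [z])

-- contribution of one block to B's final sum
def pvBlockCount (b : Bool × List String) : Int :=
  if b.1 then (b.2.countP pvChecked : Int) else 0

def zaehle_vorhanden_alt (md_inhalt : String) (set_name : String) : Int :=
  let header := pvHeader set_name
  let st := (PySem.Str.splitlines md_inhalt).foldl (pvStepB header) ([], false, [])
  ((st.1 ++ [(st.2.1, st.2.2)]).map pvBlockCount).sum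

-- ===== PRECONDITION & SPEC =====
def Spec_zaehle_vorhanden (md_inhalt : String) (set_name : String) (out : Int) : Prop := out = zaehle_vorhanden_alt md_inhalt set_name
instance (md_inhalt : String) (set_name : String) (out : Int) : Decidable (Spec_zaehle_vorhanden md_inhalt set_name out) := by unfold Spec_zaehle_vorhanden; infer_instance

-- ===== CLAIM (what is proved, stated in full; the proofs are below) =====
def Claim_equal_zaehle_vorhanden : Prop := ∀ (md_inhalt : String) (set_name : String), Dom_zaehle_vorhanden md_inhalt set_name → Spec_zaehle_vorhanden md_inhalt set_name (zaehle_vorhanden md_inhalt set_name)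

-- ===== LEMMAS AND PROOFS =====

-- B's final sum, read off a mid-loop state (proof-only abbreviation)
def pvSumB (st : List (Bool × List String) × Bool × List String) : Int :=
  ((st.1 ++ [(st.2.1, st.2.2)]).map pvBlockCount).sum

-- A's count accumulator is additive in its starting value
theorem pvA_shift (header : String) (lines : List String) :
    ∀ (st : Int × Bool),
      (lines.foldl (pvStepA header) st).1 = st.1 + (lines.foldl (pvStepA header) (0, st.2)).1 := by
  induction lines with
  | nil => intro st; simp
  | cons z tl ih =>
    intro st
    rw [List.foldl_cons, List.foldl_cons, ih (pvStepA header st z),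
      ih (pvStepA header (0, st.2) z)]
    have h1 : (pvStepA header st z).1 = st.1 + (pvStepA header (0, st.2) z).1 := by
      obtain ⟨c, on⟩ := st
      simp only [pvStepA]
      split_ifs <;> omega
    have h2 : (pvStepA header st z).2 = (pvStepA header (0, st.2) z).2 := by
      obtain ⟨c, on⟩ := st; rfl
    rw [h1, h2]
    omega

-- what one A-step does on a marker line
theorem pvStepA_marker (header : String) (on : Bool) (z : String)
    (hm : (pvIsOn header z || pvIsOff header z) = true) :
    pvStepA header (0, on) z =
      (if pvIsOn header z && pvChecked z then (1 : Int) else 0, pvIsOn header z) := by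
  simp only [pvStepA, pvIsOn, pvIsOff, pvChecked] at hm ⊢
  by_cases ha : PySem.Str.isIn header z = true <;>
    by_cases hb : PySem.Str.isIn "##" z = true <;>
      by_cases hc : PySem.Str.startswith z "## " = true <;>
        by_cases hd : PySem.Str.startswith (PySem.Str.strip z) "- [x]" = true <;>
          cases on <;> simp_all

-- what one A-step does on a plain line
theorem pvStepA_plain (header : String) (on : Bool) (z : String)
    (hm : (pvIsOn header z || pvIsOff header z) = false) :
    pvStepA header (0, on) z = (if on && pvChecked z then (1 : Int) else 0, on) := by
  simp only [pvStepA, pvIsOn, pvIsOff, pvChecked] at hm ⊢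
  by_cases ha : PySem.Str.isIn header z = true <;>
    by_cases hb : PySem.Str.isIn "##" z = true <;>
      by_cases hc : PySem.Str.startswith z "## " = true <;>
        by_cases hd : PySem.Str.startswith (PySem.Str.strip z) "- [x]" = true <;>
          cases on <;> simp_all

-- the key invariant: B's block sum from any mid-loop state equals the blocks
-- already closed, the open block, plus what A's loop counts on the rest
theorem pvKey (header : String) (lines : List String) :
    ∀ (blocks : List (Bool × List String)) (on : Bool) (cur : List String),
      pvSumB (lines.foldl (pvStepB header) (blocks, on, cur)) =
      (blocks.map pvBlockCount).sum + pvBlockCount (on, cur) +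
        (lines.foldl (pvStepA header) (0, on)).1 := by
  induction lines with
  | nil => intro blocks on cur; simp [pvSumB]
  | cons z tl ih =>
    intro blocks on cur
    rw [List.foldl_cons, List.foldl_cons]
    cases hm : (pvIsOn header z || pvIsOff header z) with
    | true =>
      have hB : pvStepB header (blocks, on, cur) z =
          (blocks ++ [(on, cur)], pvIsOn header z, [z]) := by
        simp [pvStepB, hm]
      rw [hB, ih, pvStepA_marker header on z hm,
        pvA_shift header tl ((if pvIsOn header z && pvChecked z then (1 : Int) else 0),
          pvIsOn header z)]
      dsimp only
      simp only [List.map_append, List.sum_append, List.map_cons, List.map_nil,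
        List.sum_cons, List.sum_nil]
      cases h1 : pvIsOn header z <;> cases h2 : pvChecked z <;>
        simp [pvBlockCount, h2] <;> omega
    | false =>
      have hB : pvStepB header (blocks, on, cur) z = (blocks, on, cur ++ [z]) := by
        simp [pvStepB, hm]
      rw [hB, ih, pvStepA_plain header on z hm,
        pvA_shift header tl ((if on && pvChecked z then (1 : Int) else 0), on)]
      dsimp only
      cases h1 : on <;> cases h2 : pvChecked z <;>
        simp [pvBlockCount, h2, List.countP_append] <;> omega

-- ===== VERDICT (by name: the statement is the Claim_ definition above) =====
theorem zaehle_vorhanden_spec : Claim_equal_zaehle_vorhanden := by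
  intro md sn _
  show zaehle_vorhanden md sn = zaehle_vorhanden_alt md sn
  have h := pvKey (pvHeader sn) (PySem.Str.splitlines md) [] false []
  simpa [zaehle_vorhanden, zaehle_vorhanden_alt, pvSumB, pvBlockCount] using h.symm
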